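-- pv_equiv track=rewrite | github.com/shuo202483/Leetcode_adventure-code- | 1668.py | maxRepeating_two_pointers
-- ===== SOURCE A (Python) =====
-- def maxRepeating_two_pointers(sequence, word):
--     """
--     思路：枚举每个起始位置，能匹配 word 就跳 len(word) 继续，否则跳 1 换起点
--     关键：必须记录"从当前起点开始"的连续次数，失配就换起点清零
--     时间：O(n * m)  空间：O(1) 或 O(m)（切片比较时创建子串）
--     """
--     n, m = len(sequence), len(word)
--     max_cnt = 0
--
--     for start in range(n):
--         cnt = 0
--         i = start
--         # 从 start 开始，能连续匹配多少次 word
--         while i + m <= n and sequence[i:i + m] == word: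
--             cnt += 1
--             i += m  # 跳过整个 word，检查后面是否还是 word
--
--         max_cnt = max(max_cnt, cnt)
--
--     return max_cnt
-- ===== SOURCE B (Python) =====
-- def maxRepeating_two_pointers(sequence, word):
--     # DP right-to-left: reps[i] = reps[i+m] + 1 when word starts at i, else 0;
--     # the answer is the largest reps value.  O(n*m) instead of A's O(n^2).
--     n, m = len(sequence), len(word)
--     if m == 0:
--         return 0
--     reps = [0] * (n + 1 + m)
--     best = 0
--     for i in range(n - m, -1, -1):
--         if sequence[i:i + m] == word:
--             v = reps[i + m] + 1
--             reps[i] = v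
--             if v > best:
--                 best = v
--     return best
-- ===== Notes on version B (the rewrite author's own statement) =====
-- stated objective: faster
-- what changed: Replaces A's per-start rescan (for every start, re-walk the whole run of word-matches) with a single right-to-left DP pass where reps[i] = reps[i+m] + 1 when word occurs at i, reusing already-computed run lengths.
-- outside the precondition, e.g. on maxRepeating_two_pointers('a', ''): A does not finish within the time limit, B returns 0
import Mathlib
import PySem

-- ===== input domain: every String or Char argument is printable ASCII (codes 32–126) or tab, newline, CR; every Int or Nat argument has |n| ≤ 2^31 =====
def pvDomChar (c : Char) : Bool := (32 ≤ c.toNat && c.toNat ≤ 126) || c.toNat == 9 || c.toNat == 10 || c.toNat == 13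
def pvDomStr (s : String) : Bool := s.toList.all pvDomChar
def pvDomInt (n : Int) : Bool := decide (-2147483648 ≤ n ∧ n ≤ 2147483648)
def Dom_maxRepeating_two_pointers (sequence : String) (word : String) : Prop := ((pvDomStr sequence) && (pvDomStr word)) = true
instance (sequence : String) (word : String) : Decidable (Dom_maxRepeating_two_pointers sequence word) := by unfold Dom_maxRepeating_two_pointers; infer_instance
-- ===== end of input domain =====

-- B replaces A's per-start rescan (quadratic) by one right-to-left DP pass, reps[i] = reps[i+m]+1
-- on a match; exact same return value on Pre_ (Pre_ only excludes word = "" with sequence ≠ "",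
-- where A's while loop never terminates).

-- ===== PORT A =====
-- A's inner while loop: how many consecutive copies of `word` start at position i (jumping m each time).
-- `fuel` only makes the recursion structural: l.length + 1 steps always suffice when w ≠ []
-- (each iteration needs i + w.length ≤ l.length and advances i by w.length ≥ 1; Pre_ gives w ≠ [] unless l = []).
def pvCntA (l w : List Char) (fuel : Nat) (i : Int) : Int :=
  match fuel with
  | 0 => 0
  | f+1 =>
    if i + (w.length : Int) ≤ (l.length : Int) ∧
        PySem.List.slice l (some i) (some (i + (w.length : Int))) = w then
      1 + pvCntA l w f (i + (w.length : Int))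
    else 0

def maxRepeating_two_pointers (sequence : String) (word : String) : Int :=
  (PySem.List.pyRange 0 (sequence.toList.length : Int) 1).foldl
    (fun max_cnt start =>
      max max_cnt (pvCntA sequence.toList word.toList (sequence.toList.length + 1) start))
    0

-- ===== PORT B =====
-- one step of B's loop body; state = (reps, best).  Indices i and i + m are always ≥ 0 and
-- within reps here (i ranges over n-m..0), so `.toNat` / `.set` are exact for Python's reps[...]
def pvStepB (l w : List Char) (st : List Int × Int) (i : Int) : List Int × Int :=
  if PySem.List.slice l (some i) (some (i + (w.length : Int))) = w then
    let v := PySem.List.pyGetD st.1 (i + (w.length : Int)) 0 + 1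
    (st.1.set i.toNat v, if v > st.2 then v else st.2)
  else st

def maxRepeating_two_pointers_alt (sequence : String) (word : String) : Int :=
  let l := sequence.toList
  let w := word.toList
  let n : Int := l.length
  let m : Int := w.length
  if m = 0 then 0
  else
    ((PySem.List.pyRange (n - m) (-1) (-1)).foldl (pvStepB l w)
      (List.replicate (n + 1 + m).toNat 0, 0)).2

-- ===== PRECONDITION & SPEC =====
-- Pre_ excludes exactly word = "" with sequence ≠ "": there Python A's while loop never
-- terminates (i += 0 forever), so A returns no value.
def Pre_maxRepeating_two_pointers (sequence : String) (word : String) : Prop :=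
  word = "" → sequence = ""
instance (sequence : String) (word : String) : Decidable (Pre_maxRepeating_two_pointers sequence word) := by unfold Pre_maxRepeating_two_pointers; infer_instance

def pvWitness_maxRepeating_two_pointers : String × String := ("abababa", "ab")

def Spec_maxRepeating_two_pointers (sequence : String) (word : String) (out : Int) : Prop := out = maxRepeating_two_pointers_alt sequence word
instance (sequence : String) (word : String) (out : Int) : Decidable (Spec_maxRepeating_two_pointers sequence word out) := by unfold Spec_maxRepeating_two_pointers; infer_instance

-- ===== CLAIM (what is proved, stated in full; the proofs are below) =====
def Claim_equal_maxRepeating_two_pointers : Prop := ∀ (sequence : String) (word : String), Dom_maxRepeating_two_pointers sequence word → Pre_maxRepeating_two_pointers sequence word → Spec_maxRepeating_two_pointers sequence word (maxRepeating_two_pointers sequence word)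

-- ===== LEMMAS AND PROOFS =====

-- the exact count, with its canonical fuel
def pvC (l w : List Char) (i : Int) : Int := pvCntA l w (l.length + 1) i

-- running maximum of pvC over starts 0 .. t-1
def pvM (l w : List Char) : Nat → Int
  | 0 => 0
  | t+1 => max (pvM l w t) (pvC l w (t : Int))

lemma pvCntA_of_gt (l w : List Char) (f : Nat) (i : Int)
    (h : (l.length : Int) < i + w.length) : pvCntA l w f i = 0 := by
  cases f with
  | zero => rfl
  | succ f => simp [pvCntA]; intro h'; omega

lemma pvCntA_nonneg (l w : List Char) : ∀ (f : Nat) (i : Int), 0 ≤ pvCntA l w f i := by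
  intro f
  induction f with
  | zero => intro i; simp [pvCntA]
  | succ f ihf =>
    intro i
    simp only [pvCntA]
    split
    · have := ihf (i + (w.length : Int)); omega
    · omega

lemma pvM_nonneg (l w : List Char) (t : Nat) : 0 ≤ pvM l w t := by
  induction t with
  | zero => simp [pvM]
  | succ t ih => simp [pvM]; left; exact ih

lemma pvCntA_fuel_succ (l w : List Char) (hw : w ≠ []) :
    ∀ (f : Nat) (i : Int), ((l.length : Int) - i).toNat < f →
      pvCntA l w f i = pvCntA l w (f+1) i := by
  intro f
  induction f with
  | zero => intro i h; omega
  | succ f ih =>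
    intro i h
    have hm : 1 ≤ (w.length : Int) := by
      have : w.length ≠ 0 := by simpa using hw
      omega
    show pvCntA l w (f+1) i = pvCntA l w (f+1+1) i
    simp only [pvCntA]
    split
    · rename_i hg
      obtain ⟨h1, _⟩ := hg
      have : ((l.length : Int) - (i + w.length)).toNat < f := by omega
      rw [ih (i + (w.length : Int)) this]
      rfl
    · rfl

lemma pvCntA_fuel_le (l w : List Char) (hw : w ≠ []) (f f' : Nat) (i : Int)
    (h : ((l.length : Int) - i).toNat < f) (hle : f ≤ f') :
    pvCntA l w f i = pvCntA l w f' i := by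
  induction f' , hle using Nat.le_induction with
  | base => rfl
  | succ f' hle ih => rw [ih, pvCntA_fuel_succ l w hw f' i (by omega)]

lemma pvCntA_fuel_eq (l w : List Char) (hw : w ≠ []) (f f' : Nat) (i : Int)
    (h : ((l.length : Int) - i).toNat < f) (h' : ((l.length : Int) - i).toNat < f') :
    pvCntA l w f i = pvCntA l w f' i := by
  rcases Nat.le_total f f' with hle | hle
  · exact pvCntA_fuel_le l w hw f f' i h hle
  · exact (pvCntA_fuel_le l w hw f' f i h' hle).symm

-- unfolding pvC at a matching position
lemma pvC_match (l w : List Char) (hw : w ≠ []) (i : Int) (hi : 0 ≤ i)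
    (h1 : i + (w.length : Int) ≤ (l.length : Int))
    (h2 : PySem.List.slice l (some i) (some (i + (w.length : Int))) = w) :
    pvC l w i = 1 + pvC l w (i + (w.length : Int)) := by
  have hm : 1 ≤ (w.length : Int) := by
    have : w.length ≠ 0 := by simpa using hw
    omega
  show pvCntA l w (l.length + 1) i = _
  rw [show l.length + 1 = (l.length) + 1 from rfl]
  simp only [pvCntA, h1, h2, and_self, if_true]
  congr 1
  exact pvCntA_fuel_eq l w hw l.length (l.length + 1) (i + (w.length : Int))
    (by omega) (by omega)

lemma pvC_nomatch (l w : List Char) (i : Int)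
    (h : ¬ (i + (w.length : Int) ≤ (l.length : Int) ∧
        PySem.List.slice l (some i) (some (i + (w.length : Int))) = w)) :
    pvC l w i = 0 := by
  simp only [pvC, pvCntA, if_neg h]

lemma pvC_of_gt (l w : List Char) (i : Int)
    (h : (l.length : Int) < i + w.length) : pvC l w i = 0 :=
  pvCntA_of_gt l w _ i h

-- A's fold over range(n) is the running maximum pvM
lemma pvA_eq_pvM (l w : List Char) (t : Nat) :
    (PySem.List.pyRange 0 (t : Int) 1).foldl
      (fun max_cnt start => max max_cnt (pvCntA l w (l.length + 1) start)) 0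
    = pvM l w t := by
  induction t with
  | zero => simp [pvM]
  | succ t ih =>
    rw [show ((t+1 : Nat) : Int) = (t : Int) + 1 by push_cast; ring,
      PySem.List.pyRange_one_succ_right (by positivity), List.foldl_append]
    simp [pvM, ih, pvC]

-- pvM is unchanged across a tail of zero counts
lemma pvM_stable (l w : List Char) (t₀ t : Nat) (hle : t₀ ≤ t)
    (hz : ∀ s : Nat, t₀ ≤ s → s < t → pvC l w (s : Int) = 0) :
    pvM l w t = pvM l w t₀ := by
  induction t, hle using Nat.le_induction with
  | base => rfl
  | succ t hle ih =>
    have : pvM l w (t+1) = max (pvM l w t) (pvC l w (t : Int)) := rfl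
    rw [this, hz t hle (by omega), ih (fun s hs hs' => hz s hs (by omega))]
    exact max_eq_left (pvM_nonneg l w t₀)

-- B's fold invariant: reps[k] holds pvC k for every already-processed k, 0 elsewhere;
-- best accumulates the running maximum.
lemma pvB_invariant (l w : List Char) (hw : w ≠ []) :
    ∀ (t : Nat) (j : Int) (dp : List Int) (best : Int),
      j = (t : Int) - 1 → j ≤ (l.length : Int) - (w.length : Int) →
      dp.length = ((l.length : Int) + 1 + (w.length : Int)).toNat →
      (∀ k : Int, 0 ≤ k → dp.getD k.toNat 0 = if j < k then pvC l w k else 0) →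
      0 ≤ best →
      ((PySem.List.pyRange j (-1) (-1)).foldl (pvStepB l w) (dp, best)).2
        = max best (pvM l w t) := by
  intro t
  induction t with
  | zero =>
    intro j dp best hj _ _ _ hb
    rw [PySem.List.pyRange_neg_one_eq_nil (by omega)]
    simp [pvM]
    omega
  | succ t ih =>
    intro j dp best hj hjn hlen hdp hb
    have hm : 1 ≤ (w.length : Int) := by
      have : w.length ≠ 0 := by simpa using hw
      omega
    have hj0 : 0 ≤ j := by omega
    rw [PySem.List.pyRange_neg_one_cons (by omega), List.foldl_cons]
    have hjt : j = (t : Int) := by omega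
    by_cases hmatch : PySem.List.slice l (some j) (some (j + (w.length : Int))) = w
    · -- match at j : reps[j] := reps[j+m] + 1 = pvC j, best := max best (pvC j)
      have hcj : pvC l w j = 1 + pvC l w (j + (w.length : Int)) :=
        pvC_match l w hw j hj0 (by omega) hmatch
      have hread : PySem.List.pyGetD dp (j + (w.length : Int)) 0 = pvC l w (j + (w.length : Int)) := by
        rw [PySem.List.pyGetD_of_nonneg dp 0 (by omega : (0:Int) ≤ j + (w.length : Int))]
        rw [hdp (j + (w.length : Int)) (by omega)]
        simp [show j < j + (w.length : Int) by omega]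
      have hstep : pvStepB l w (dp, best) j
          = (dp.set j.toNat (pvC l w j), max best (pvC l w j)) := by
        simp only [pvStepB, hmatch, if_true, hread]
        rw [show pvC l w (j + (w.length : Int)) + 1 = pvC l w j from by omega]
        rw [Prod.mk.injEq]
        refine ⟨rfl, ?_⟩
        rw [max_def]
        split_ifs <;> omega
      rw [hstep]
      rw [ih (j - 1) _ _ (by omega) (by omega)
        (by simpa using hlen)
        (by
          intro k hk
          by_cases hkj : k = j
          · subst hkj
            have hklt : k.toNat < dp.length := by rw [hlen]; omega
            simp [List.getD_eq_getElem?_getD, hklt, show k - 1 < k from by omega]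
          · have hne : k.toNat ≠ j.toNat := by omega
            rw [List.getD_eq_getElem?_getD, List.getElem?_set_ne (by omega),
              ← List.getD_eq_getElem?_getD, hdp k hk]
            by_cases hlt : j < k
            · simp [show j - 1 < k from by omega, hlt]
            · simp [show ¬ j - 1 < k from by omega, hlt])
        (by have := pvM_nonneg l w t; omega)]
      have hc0 : 0 ≤ pvC l w j := pvCntA_nonneg l w _ j
      show max (max best (pvC l w j)) (pvM l w t) = max best (pvM l w (t+1))
      have : pvM l w (t+1) = max (pvM l w t) (pvC l w (t : Int)) := rfl
      rw [this, ← hjt]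
      rcases le_total best (pvC l w j) with h | h <;>
        rcases le_total (pvC l w j) (pvM l w t) with h' | h' <;>
        simp [max_def] <;> omega
    · -- no match at j : state unchanged, pvC j = 0
      have hcj : pvC l w j = 0 := pvC_nomatch l w j (by intro hc; exact hmatch hc.2)
      have hstep : pvStepB l w (dp, best) j = (dp, best) := by
        simp only [pvStepB, hmatch, if_false]
      rw [hstep]
      rw [ih (j - 1) _ _ (by omega) (by omega) hlen
        (by
          intro k hk
          rw [hdp k hk]
          by_cases hkj : k = j
          · subst hkj
            simp [show k - 1 < k from by omega, hcj]
          · by_cases hlt : j < k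
            · simp [show j - 1 < k from by omega, hlt]
            · simp [show ¬ j - 1 < k from by omega, hlt])
        hb]
      show max best (pvM l w t) = max best (pvM l w (t+1))
      have : pvM l w (t+1) = max (pvM l w t) (pvC l w (t : Int)) := rfl
      rw [this, ← hjt, hcj]
      have := pvM_nonneg l w t
      rcases le_total best (pvM l w t) with h | h <;> simp [max_def] <;> omega

-- ===== VERDICT (by name: the statement is the Claim_ definition above) =====
theorem maxRepeating_two_pointers_spec : Claim_equal_maxRepeating_two_pointers := by
  intro sequence word _ hpre
  unfold Spec_maxRepeating_two_pointers
  set l := sequence.toList with hl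
  set w := word.toList with hwdef
  by_cases hw : w = []
  · -- Pre_ forces sequence = "" : both sides are 0
    have hword : word = "" := String.toList_eq_nil_iff.mp hw
    have hseq : sequence = "" := hpre hword
    subst hword hseq
    decide
  · have hm : 1 ≤ (w.length : Int) := by
      have : w.length ≠ 0 := by simpa using hw
      omega
    have hA : maxRepeating_two_pointers sequence word = pvM l w l.length := by
      unfold maxRepeating_two_pointers
      rw [← hl, ← hwdef]
      exact pvA_eq_pvM l w l.length
    have hm0 : (w.length : Int) ≠ 0 := by omega
    have hB : maxRepeating_two_pointers_alt sequence word
        = ((PySem.List.pyRange ((l.length : Int) - (w.length : Int)) (-1) (-1)).foldl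
            (pvStepB l w) (List.replicate ((l.length : Int) + 1 + (w.length : Int)).toNat 0, 0)).2 := by
      unfold maxRepeating_two_pointers_alt
      rw [← hl, ← hwdef]
      simp only [hm0, if_false]
    rw [hA, hB]
    by_cases hnm : (l.length : Int) - (w.length : Int) < 0
    · -- word longer than sequence: B's loop is empty, A's counts are all 0
      rw [PySem.List.pyRange_neg_one_eq_nil (by omega)]
      simp only [List.foldl_nil]
      rw [pvM_stable l w 0 l.length (by omega)
        (by intro s _ hs; exact pvC_of_gt l w (s : Int) (by omega))]
      rfl
    · push Not at hnm
      have hinv := pvB_invariant l w hw ((l.length : Int) - (w.length : Int) + 1).toNat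
        ((l.length : Int) - (w.length : Int))
        (List.replicate ((l.length : Int) + 1 + (w.length : Int)).toNat 0) 0
        (by omega) (by omega)
        (by simp)
        (by
          intro k hk
          have : (List.replicate ((l.length : Int) + 1 + (w.length : Int)).toNat (0:Int)).getD k.toNat 0 = 0 := by
            rw [List.getD_eq_getElem?_getD, List.getElem?_replicate]
            split <;> simp
          rw [this]
          split
          · rename_i hlt
            exact (pvC_of_gt l w k (by omega)).symm
          · rfl)
        le_rfl
      rw [hinv]
      rw [pvM_stable l w ((l.length : Int) - (w.length : Int) + 1).toNat l.length
        (by omega)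
        (by intro s hs _; exact pvC_of_gt l w (s : Int) (by omega))]
      have := pvM_nonneg l w ((l.length : Int) - (w.length : Int) + 1).toNat
      omega
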